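-- pv_equiv track=rewrite | github.com/bmdyy/AoC | 2024/02/sol.py | is_safe_ex
-- ===== SOURCE A (Python) =====
-- def is_safe(rep):
--     is_asc = rep[1] > rep[0]
--
--     i = 1
--     while i < len(rep):
--         # All increasing OR All decreasing
--         if is_asc and (rep[i] <= rep[i-1]):
--             return False
--         elif not is_asc and (rep[i] >= rep[i-1]):
--             return False
--
--         # Any two adjacent must differ by 1-3
--         diff = abs(rep[i] - rep[i-1])
--         if diff < 1 or diff > 3:
--             return False
--
--         i = i + 1
--
--     return True
--
-- def is_safe_ex(rep):
--     # Check if the base report is safe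
--     if is_safe(rep):
--         return True
--
--     # Create a copy of the list without a single element and check if it is safe
--     for i in range(len(rep)):
--         rep_copy = rep.copy()
--         rep_copy.pop(i)
--         if is_safe(rep_copy):
--             return True
-- ===== SOURCE B (Python) =====
-- def is_safe_ex(rep):
--     # O(n): check once; on failure only removing index 0, 1, j-1 or j (j = a
--     # violating pair's right index) can help, so test just those four removals.
--     def ok(asc, a, b):
--         d = b - a
--         return (d > 0 if asc else d < 0) and 1 <= abs(d) <= 3
--
--     def safe(xs):
--         if len(xs) < 2:
--             return True
--         asc = xs[1] > xs[0]
--         return all(ok(asc, a, b) for a, b in zip(xs, xs[1:]))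
--
--     if safe(rep):
--         return True
--     asc = rep[1] > rep[0]
--     j = next(i for i in range(1, len(rep)) if not ok(asc, rep[i - 1], rep[i]))
--     for k in (0, 1, j - 1, j):
--         if safe(rep[:k] + rep[k + 1:]):
--             return True
-- ===== Notes on version B (the rewrite author's own statement) =====
-- stated objective: faster
-- what changed: A retries the full safety scan on every one-element-removed copy (O(n^2)); B scans once, and on failure tests removal of only the four candidate indices 0, 1, j-1, j around the first violating pair j, giving O(n).
import Mathlib
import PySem

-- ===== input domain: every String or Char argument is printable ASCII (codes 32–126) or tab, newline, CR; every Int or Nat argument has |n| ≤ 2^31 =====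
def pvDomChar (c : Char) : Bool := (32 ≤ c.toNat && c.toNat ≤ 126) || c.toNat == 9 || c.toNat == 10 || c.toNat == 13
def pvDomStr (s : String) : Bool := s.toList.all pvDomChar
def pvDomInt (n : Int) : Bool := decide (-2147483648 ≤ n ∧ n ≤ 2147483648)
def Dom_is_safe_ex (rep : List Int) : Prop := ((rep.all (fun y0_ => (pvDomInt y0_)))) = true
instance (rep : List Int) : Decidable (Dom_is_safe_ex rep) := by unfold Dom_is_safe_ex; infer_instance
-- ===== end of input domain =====

-- B replaces A's try-every-removal retry loop by a single scan that, on failure, tests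
-- removal of only the four candidate indices 0, 1, j-1, j around the first violating pair j.

-- ===== PORT A =====
-- the while-loop of is_safe: i counts up from 1
def pvLoopA (rep : List Int) (asc : Bool) (i : Nat) : Option Bool :=
  if _h : i < rep.length then
    match PySem.List.pyGet? rep (i : Int), PySem.List.pyGet? rep ((i : Int) - 1) with
    | some cur, some prev =>
      if asc && decide (cur ≤ prev) then some false
      else if !asc && decide (cur ≥ prev) then some false
      else if (cur - prev).natAbs < 1 || 3 < (cur - prev).natAbs then some false
      else pvLoopA rep asc (i + 1)
    | _, _ => none
  else some true
termination_by rep.length - i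

def pvIsSafeA (rep : List Int) : Option Bool :=
  match PySem.List.pyGet? rep 1, PySem.List.pyGet? rep 0 with
  | some r1, some r0 => pvLoopA rep (decide (r1 > r0)) 1
  | _, _ => none

-- the 'for i in range(len(rep))' loop of is_safe_ex
def pvExLoopA (rep : List Int) : List Int → Option Bool
  | [] => none
  | i :: rest =>
    match PySem.List.pop? rep i with
    | some (_, copy) =>
      match pvIsSafeA copy with
      | some true => some true
      | some false => pvExLoopA rep rest
      | none => none
    | none => none

def is_safe_ex (rep : List Int) : Option Bool :=
  match pvIsSafeA rep with
  | some true => some true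
  | some false => pvExLoopA rep (PySem.List.pyRange 0 rep.length 1)
  | none => none

-- ===== PORT B =====
def pvOk (asc : Bool) (a b : Int) : Bool :=
  let d := b - a
  (if asc then decide (0 < d) else decide (d < 0)) && (decide (1 ≤ d.natAbs) && decide (d.natAbs ≤ 3))

-- Source B's safe: lists of length < 2 are safe; else all adjacent pairs (zip) are ok
def pvSafeB : List Int → Bool
  | x0 :: x1 :: t =>
    ((x0 :: x1 :: t).zip (x1 :: t)).all (fun p => pvOk (decide (x0 < x1)) p.1 p.2)
  | _ => true

def is_safe_ex_alt (rep : List Int) : Option Bool :=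
  if pvSafeB rep then some true
  else
    match PySem.List.pyGet? rep 1, PySem.List.pyGet? rep 0 with
    | some r1, some r0 =>
      -- j = next(i for i in range(1, len(rep)) if not ok(...)); indices lie in [1, len)
      match (List.range' 1 (rep.length - 1)).find?
          (fun j => !(pvOk (decide (r0 < r1)) (rep.getD (j - 1) 0) (rep.getD j 0))) with
      | some j =>
        -- rep[:k] + rep[k+1:] = take k ++ drop (k+1)  (exact: k ≥ 0)
        if [0, 1, j - 1, j].any (fun k => pvSafeB (rep.take k ++ rep.drop (k + 1))) then
          some true
        else none
      | none => none
    | _, _ => none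

-- ===== PRECONDITION & SPEC =====
-- Pre_ excludes exactly the inputs on which A raises IndexError: reports with fewer than
-- 2 items, and 2-item reports whose single gap is outside 1..3 (the removal loop then
-- calls is_safe on a 1-item copy).
def Pre_is_safe_ex (rep : List Int) : Prop :=
  2 ≤ rep.length ∧
    (rep.length = 2 →
      1 ≤ (rep.getD 1 0 - rep.getD 0 0).natAbs ∧ (rep.getD 1 0 - rep.getD 0 0).natAbs ≤ 3)
instance (rep : List Int) : Decidable (Pre_is_safe_ex rep) := by
  unfold Pre_is_safe_ex; infer_instance
def pvWitness_is_safe_ex : List Int := ([1, 2, 4])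

def Spec_is_safe_ex (rep : List Int) (out : Option Bool) : Prop := out = is_safe_ex_alt rep
instance (rep : List Int) (out : Option Bool) : Decidable (Spec_is_safe_ex rep out) := by
  unfold Spec_is_safe_ex; infer_instance

-- ===== CLAIM (what is proved, stated in full; the proofs are below) =====
def Claim_equal_is_safe_ex : Prop :=
  ∀ (rep : List Int), Dom_is_safe_ex rep → Pre_is_safe_ex rep → Spec_is_safe_ex rep (is_safe_ex rep)

-- ===== LEMMAS AND PROOFS =====

theorem pyGet?_one_cons (a b : Int) (l : List Int) :
    PySem.List.pyGet? (a :: b :: l) 1 = some b := by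
  simp

theorem pyGet?_zero_cons (a : Int) (l : List Int) :
    PySem.List.pyGet? (a :: l) 0 = some a := by
  simp

theorem stepA (asc : Bool) (prev cur : Int) (k : Option Bool) :
    (if asc && decide (cur ≤ prev) then some false
     else if !asc && decide (cur ≥ prev) then some false
     else if (cur - prev).natAbs < 1 || 3 < (cur - prev).natAbs then some false
     else k) = if pvOk asc prev cur then k else some false := by
  cases asc <;> simp [pvOk] <;> split_ifs <;> first | rfl | omega

-- while-loop characterisation: the remaining loop is an 'all' over the remaining indices
theorem pvLoopA_char (rep : List Int) (asc : Bool) (n : Nat) :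
    ∀ i : Nat, rep.length - i = n → 1 ≤ i →
    pvLoopA rep asc i = some ((List.range' i (rep.length - i)).all
      (fun m => pvOk asc (rep.getD (m - 1) 0) (rep.getD m 0))) := by
  induction n with
  | zero =>
    intro i hn _
    rw [pvLoopA.eq_def, dif_neg (by omega)]
    simp [hn]
  | succ m IH =>
    intro i hn hi
    have hlt : i < rep.length := by omega
    have hm1 : i - 1 < rep.length := by omega
    have e1 : PySem.List.pyGet? rep (i : Int) = some (rep[i]'hlt) := by
      rw [PySem.List.pyGet?_natCast]; exact List.getElem?_eq_getElem hlt
    have e2 : PySem.List.pyGet? rep ((i : Int) - 1) = some (rep[i - 1]'hm1) := by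
      have h : ((i : Int) - 1) = ((i - 1 : Nat) : Int) := by omega
      rw [h, PySem.List.pyGet?_natCast]; exact List.getElem?_eq_getElem hm1
    rw [pvLoopA.eq_def, dif_pos hlt]
    simp only [e1, e2]
    rw [stepA]
    have hr : rep.length - i = (rep.length - (i + 1)) + 1 := by omega
    rw [hr, List.range'_succ, List.all_cons]
    rw [List.getD_eq_getElem rep 0 hm1, List.getD_eq_getElem rep 0 hlt]
    cases hok : pvOk asc (rep[i - 1]'hm1) (rep[i]'hlt) with
    | false => simp
    | true =>
      simp only [Bool.true_and]
      exact IH (i + 1) (by omega) (by omega)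

theorem zipAll_range' (xs : List Int) (f : Int → Int → Bool) :
    ((xs.zip xs.tail).all fun p => f p.1 p.2) =
    ((List.range' 1 (xs.length - 1)).all fun m => f (xs.getD (m - 1) 0) (xs.getD m 0)) := by
  have hz : (xs.zip xs.tail).length = xs.length - 1 := by
    rw [List.length_zip, List.length_tail]
    omega
  refine Bool.coe_iff_coe.mp ?_
  simp only [List.all_eq_true]
  constructor
  · intro H m hm
    rw [List.mem_range'_1] at hm
    have hmn : m < xs.length := by omega
    have hm1 : m - 1 < xs.length := by omega
    have hidx : m - 1 < (xs.zip xs.tail).length := by omega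
    have := H _ (List.mem_iff_getElem.mpr ⟨m - 1, hidx, rfl⟩)
    rw [List.getElem_zip] at this
    rw [List.getD_eq_getElem xs 0 hm1, List.getD_eq_getElem xs 0 hmn]
    simpa [List.getElem_tail, show m - 1 + 1 = m by omega] using this
  · intro H p hp
    obtain ⟨i, hi, hpe⟩ := List.mem_iff_getElem.mp hp
    subst hpe
    rw [List.getElem_zip]
    have hin : i + 1 < xs.length := by omega
    have := H (i + 1) (by rw [List.mem_range'_1]; omega)
    rw [List.getD_eq_getElem xs 0 (by omega : i + 1 - 1 < xs.length),
        List.getD_eq_getElem xs 0 hin] at this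
    simpa [List.getElem_tail] using this

theorem pvSafeB_char (x0 x1 : Int) (t : List Int) :
    pvSafeB (x0 :: x1 :: t) =
    ((List.range' 1 ((x0 :: x1 :: t).length - 1)).all fun m =>
      pvOk (decide (x0 < x1)) ((x0 :: x1 :: t).getD (m - 1) 0) ((x0 :: x1 :: t).getD m 0)) := by
  have h := zipAll_range' (x0 :: x1 :: t) (fun a b => pvOk (decide (x0 < x1)) a b)
  simpa [pvSafeB] using h

-- A's is_safe computes B's safe (wrapped in 'some') on lists of length ≥ 2
theorem pvIsSafeA_safeB (xs : List Int) (h2 : 2 ≤ xs.length) :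
    pvIsSafeA xs = some (pvSafeB xs) := by
  match xs, h2 with
  | x0 :: x1 :: t, _ =>
    have e1 := pyGet?_one_cons x0 x1 t
    have e0 := pyGet?_zero_cons x0 (x1 :: t)
    simp only [pvIsSafeA, e1, e0]
    rw [pvLoopA_char (x0 :: x1 :: t) _ ((x0 :: x1 :: t).length - 1) 1 rfl le_rfl,
        pvSafeB_char]

-- A's removal loop is an 'any' over the index list
theorem pvExLoopA_char (rep : List Int) (h3 : 3 ≤ rep.length) :
    ∀ L : List Int, (∀ i ∈ L, 0 ≤ i ∧ i < (rep.length : Int)) →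
    pvExLoopA rep L =
      if L.any (fun i => pvSafeB (rep.eraseIdx i.toNat)) then some true else none := by
  intro L
  induction L with
  | nil => intro _; simp [pvExLoopA]
  | cons i rest IH =>
    intro hb
    obtain ⟨h0, hn⟩ := hb i (List.mem_cons_self)
    obtain ⟨m, rfl⟩ : ∃ m : Nat, i = (m : Int) := ⟨i.toNat, (Int.toNat_of_nonneg h0).symm⟩
    have hnat : m < rep.length := by exact_mod_cast hn
    have hpop : PySem.List.pop? rep (m : Int) = some (rep[m], rep.eraseIdx m) :=
      PySem.List.pop?_natCast rep m hnat
    have hlen : 2 ≤ (rep.eraseIdx m).length := by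
      rw [List.length_eraseIdx_of_lt hnat]; omega
    simp only [pvExLoopA, hpop, pvIsSafeA_safeB _ hlen]
    cases hsb : pvSafeB (rep.eraseIdx m) with
    | true => simp [List.any_cons, Int.toNat_natCast, hsb]
    | false =>
      rw [List.any_cons]
      simp only [Int.toNat_natCast, hsb, Bool.false_or]
      exact IH (fun x hx => hb x (List.mem_cons_of_mem _ hx))

-- the candidate lemma: a helpful removal index must be 0, 1, j-1 or j for ANY violating pair j
theorem pvCandidates (x0 x1 : Int) (t : List Int) (j k : Nat)
    (hj1 : 1 ≤ j) (hjn : j < (x0 :: x1 :: t).length)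
    (hbad : pvOk (decide (x0 < x1)) ((x0 :: x1 :: t).getD (j - 1) 0)
      ((x0 :: x1 :: t).getD j 0) = false)
    (hk : k < (x0 :: x1 :: t).length)
    (hsafe : pvSafeB ((x0 :: x1 :: t).eraseIdx k) = true) :
    k = 0 ∨ k = 1 ∨ k = j - 1 ∨ k = j := by
  by_contra hcon
  push Not at hcon
  obtain ⟨hk0, hk1, hkj1, hkj⟩ := hcon
  obtain ⟨k', rfl⟩ : ∃ k', k = k' + 2 := ⟨k - 2, by omega⟩
  have hkt : k' < t.length := by simp only [List.length_cons] at hk; omega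
  have hjt : j < t.length + 2 := by
    have h := hjn
    simp only [List.length_cons] at h
    omega
  have herase : (x0 :: x1 :: t).eraseIdx (k' + 2) = x0 :: x1 :: t.eraseIdx k' := rfl
  have hlen : (t.eraseIdx k').length = t.length - 1 := List.length_eraseIdx_of_lt hkt
  rw [herase, pvSafeB_char, List.all_eq_true] at hsafe
  -- getD of the erased list in terms of the original
  have hgdlt : ∀ m : Nat, m < k' + 2 →
      (x0 :: x1 :: t.eraseIdx k').getD m 0 = (x0 :: x1 :: t).getD m 0 := by
    intro m hm
    rw [List.getD_eq_getElem?_getD, List.getD_eq_getElem?_getD, ← herase,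
        List.getElem?_eraseIdx_of_lt hm]
  have hgdge : ∀ m : Nat, k' + 2 ≤ m →
      (x0 :: x1 :: t.eraseIdx k').getD m 0 = (x0 :: x1 :: t).getD (m + 1) 0 := by
    intro m hm
    rw [List.getD_eq_getElem?_getD, List.getD_eq_getElem?_getD, ← herase,
        List.getElem?_eraseIdx_of_ge hm]
  have hlen2 : (x0 :: x1 :: t.eraseIdx k').length - 1 = t.length := by
    simp only [List.length_cons, hlen]; omega
  rcases Nat.lt_or_ge j (k' + 2) with hcase | hcase
  · -- the removed index is beyond the violating pair: the pair survives untouched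
    have := hsafe j (by rw [List.mem_range'_1, hlen2]; omega)
    rw [hgdlt j hcase, hgdlt (j - 1) (by omega), hbad] at this
    exact absurd this (by simp)
  · -- the removed index is before the violating pair: the pair survives at (j-2, j-1)
    have hj4 : k' + 2 + 2 ≤ j := by omega
    have := hsafe (j - 1) (by rw [List.mem_range'_1, hlen2]; omega)
    rw [hgdge (j - 1) (by omega), hgdge (j - 1 - 1) (by omega),
        show j - 1 + 1 = j by omega, show j - 1 - 1 + 1 = j - 1 by omega, hbad] at this
    exact absurd this (by simp)

-- on a 2-element report inside Pre_, the base check succeeds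
theorem pvSafeB_pair (r0 r1 : Int)
    (h1 : 1 ≤ (r1 - r0).natAbs) (h3 : (r1 - r0).natAbs ≤ 3) :
    pvSafeB [r0, r1] = true := by
  simp only [pvSafeB, List.zip_cons_cons, List.zip_nil_right, List.all_cons, List.all_nil,
    Bool.and_true, pvOk]
  rcases Int.lt_or_lt_of_ne (by omega : r0 ≠ r1) with h | h
  · rw [if_pos (by simpa using h)]
    simp only [Bool.and_eq_true, decide_eq_true_eq]
    omega
  · rw [if_neg (by simpa using not_lt.mpr h.le)]
    simp only [Bool.and_eq_true, decide_eq_true_eq]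
    omega

theorem is_safe_ex_spec : Claim_equal_is_safe_ex := by
  intro rep _hdom hpre
  obtain ⟨h2, hpair⟩ := hpre
  unfold Spec_is_safe_ex
  match rep, h2, hpair with
  | r0 :: r1 :: t, _, hpair =>
    cases hb : pvSafeB (r0 :: r1 :: t) with
    | true =>
      rw [show is_safe_ex (r0 :: r1 :: t) = some true by
            simp [is_safe_ex, pvIsSafeA_safeB (r0 :: r1 :: t) (by simp), hb],
          show is_safe_ex_alt (r0 :: r1 :: t) = some true by simp [is_safe_ex_alt, hb]]
    | false =>
      cases t with
      | nil =>
        -- length 2 is impossible here: Pre_ forces the single pair to be ok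
        have hp := hpair rfl
        have := pvSafeB_pair r0 r1 (by simpa using hp.1) (by simpa using hp.2)
        rw [this] at hb
        exact absurd hb (by simp)
      | cons t0 u =>
        set xs := r0 :: r1 :: t0 :: u with hxs
        have h3 : 3 ≤ xs.length := by simp [hxs]
        -- A side: the removal loop over all indices
        have hA : is_safe_ex xs =
            if (PySem.List.pyRange 0 xs.length 1).any
                (fun i => pvSafeB (xs.eraseIdx i.toNat)) then some true else none := by
          simp only [is_safe_ex, pvIsSafeA_safeB xs (by omega), hb]
          exact pvExLoopA_char xs h3 _ (fun i hi => by
            rw [PySem.List.mem_pyRange_one] at hi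
            exact ⟨hi.1, by simpa using hi.2⟩)
        -- B side
        have e1 : PySem.List.pyGet? xs 1 = some r1 := by rw [hxs]; exact pyGet?_one_cons r0 r1 (t0 :: u)
        have e0 : PySem.List.pyGet? xs 0 = some r0 := by rw [hxs]; exact pyGet?_zero_cons r0 (r1 :: t0 :: u)
        -- the scan finds some violating index j
        have hex : ∃ m ∈ List.range' 1 (xs.length - 1),
            (!(pvOk (decide (r0 < r1)) (xs.getD (m - 1) 0) (xs.getD m 0))) = true := by
          have hchar := (pvSafeB_char r0 r1 (t0 :: u)).symm
          rw [← hxs, hb, List.all_eq_false] at hchar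
          obtain ⟨m, hm, hpm⟩ := hchar
          exact ⟨m, hm, by simpa using hpm⟩
        obtain ⟨j, hfind⟩ := Option.isSome_iff_exists.mp (List.find?_isSome.mpr hex)
        have hjbad : pvOk (decide (r0 < r1)) (xs.getD (j - 1) 0) (xs.getD j 0) = false := by
          have := List.find?_some hfind
          simpa using this
        have hjmem := List.mem_of_find?_eq_some hfind
        rw [List.mem_range'_1] at hjmem
        have hjn : j < xs.length := by
          simp only [hxs, List.length_cons] at hjmem ⊢
          omega
        have hB : is_safe_ex_alt xs =
            if [0, 1, j - 1, j].any (fun k => pvSafeB (xs.eraseIdx k)) then some true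
            else none := by
          rw [is_safe_ex_alt.eq_def, if_neg (by simp [hb]), e1, e0]
          simp only [hfind]
          have hfun : (fun k => pvSafeB (List.take k xs ++ List.drop (k + 1) xs)) =
              (fun k => pvSafeB (xs.eraseIdx k)) := by
            funext k
            rw [List.eraseIdx_eq_take_drop_succ]
          rw [hfun]
        rw [hA, hB]
        have hany : ((PySem.List.pyRange 0 xs.length 1).any
              (fun i => pvSafeB (xs.eraseIdx i.toNat))) =
            ([0, 1, j - 1, j].any (fun k => pvSafeB (xs.eraseIdx k))) := by
          refine Bool.coe_iff_coe.mp ?_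
          rw [List.any_eq_true, List.any_eq_true]
          constructor
          · rintro ⟨i, hi, hsafe⟩
            rw [PySem.List.mem_pyRange_one] at hi
            have hkn : i.toNat < xs.length := by
              have : i < (xs.length : Int) := by simpa using hi.2
              omega
            rcases pvCandidates r0 r1 (t0 :: u) j i.toNat hjmem.1 hjn hjbad hkn hsafe
              with h | h | h | h <;>
            exact ⟨i.toNat, by simp [h], hsafe⟩
          · rintro ⟨k, hk, hsafe⟩
            have hkn : k < xs.length := by
              simp only [hxs, List.length_cons]
              simp only [List.mem_cons, List.not_mem_nil, or_false] at hk
              simp only [hxs, List.length_cons] at hjn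
              rcases hk with rfl | rfl | rfl | rfl <;> omega
            refine ⟨(k : Int), ?_, by simpa using hsafe⟩
            rw [PySem.List.mem_pyRange_one]
            exact ⟨by omega, by exact_mod_cast hkn⟩
        rw [hany]
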